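-- pv_equiv track=rewrite | github.com/nastya98eremeeva-beep/bilet | solvers.py | solve_task9_calculator
-- ===== SOURCE A (Python) =====
-- from collections import defaultdict
--
-- def solve_task9_calculator(start: int, end: int, add_step: int = 1, tens_step: int = 1) -> int:
--     """
--     Задание 9: Калькулятор. Команда 1: прибавь add_step; команда 2: увеличь число десятков на tens_step (шаг +10*tens_step).
--     Сколько программ переводят start в end?
--     tens_step=1 → +10 (десятков на 1), tens_step=2 → +20 (десятков на 2).
--     """
--     step_add = add_step
--     step_tens = 10 * tens_step
--     dp = defaultdict(int)
--     dp[start] = 1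
--     for n in range(start, end + 1):
--         if dp[n] == 0:
--             continue
--         if n + step_add <= end:
--             dp[n + step_add] += dp[n]
--         # Не переполняем разряд десятков: (n//10)%10 + tens_step <= 9
--         if step_tens and n + step_tens <= end and (n // 10) % 10 + tens_step <= 9:
--             dp[n + step_tens] += dp[n]
--     return dp[end]
-- ===== SOURCE B (Python) =====
-- def solve_task9_calculator(start: int, end: int, add_step: int = 1, tens_step: int = 1) -> int:
--     """Backward suffix-count DP on the reachability lattice: ways[n] = number of programs
--     taking n to end, computed for n = end, end-g, ..., start, where g = gcd of the usable
--     (positive) command steps; ends not congruent to start modulo g are rejected up front."""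
--     t = 10 * tens_step
--     ga = add_step if add_step > 0 else 0
--     gt = t if t > 0 else 0
--     g, b = ga, gt
--     while b:
--         g, b = b, g % b
--     if start == end:
--         return 1
--     if g == 0:
--         return 0
--     if start > end:
--         return 0
--     if (end - start) % g != 0:
--         return 0
--     ways = {end: 1}
--     n = end - g
--     while n >= start:
--         c = 0
--         if ga and n + add_step <= end:
--             c += ways.get(n + add_step, 0)
--         if gt and n + t <= end and (n // 10) % 10 + tens_step <= 9:
--             c += ways.get(n + t, 0)
--         ways[n] = c
--         n -= g
--     return ways[start]
-- ===== Notes on version B (the rewrite author's own statement) =====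
-- stated objective: alternative
-- what changed: Replaces A's forward push-DP (every integer start..end pushes its count-of-programs-from-start into its successors in a defaultdict) by a backward suffix-count DP: ways[n] = number of programs from n to end, computed from n's successors scanning end down to start with stride g = gcd of the usable positive steps, after rejecting by congruence the ends not reachable modulo g.
-- outside the precondition, e.g. on solve_task9_calculator(5, 25, 0, 1): A returns 8, B returns 1
import Mathlib
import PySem

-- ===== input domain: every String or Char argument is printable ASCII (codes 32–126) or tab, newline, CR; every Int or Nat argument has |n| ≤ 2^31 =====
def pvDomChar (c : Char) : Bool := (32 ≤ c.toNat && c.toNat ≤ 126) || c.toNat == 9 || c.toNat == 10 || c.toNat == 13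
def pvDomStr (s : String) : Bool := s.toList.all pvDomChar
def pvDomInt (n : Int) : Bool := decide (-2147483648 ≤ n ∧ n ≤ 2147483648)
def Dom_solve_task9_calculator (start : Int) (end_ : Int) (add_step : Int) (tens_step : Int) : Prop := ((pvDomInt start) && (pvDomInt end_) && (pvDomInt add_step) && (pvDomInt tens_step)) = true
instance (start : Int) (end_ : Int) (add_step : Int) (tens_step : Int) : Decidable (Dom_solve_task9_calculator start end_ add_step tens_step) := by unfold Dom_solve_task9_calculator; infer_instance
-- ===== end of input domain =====

-- B replaces A's forward push-DP over every value in start..end by a backward suffix-count DP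
-- (ways[n] = programs from n to end) on the gcd-stride lattice of reachable values ("alternative").

-- ===== PORT A =====
def solve_task9_calculator (start : Int) (end_ : Int) (add_step : Int) (tens_step : Int) : Int :=
  let step_add := add_step
  let step_tens := 10 * tens_step
  -- dp = defaultdict(int); dp[start] = 1; reads of absent keys are ported as getD _ 0
  let dp : PySem.Dict Int Int := PySem.Dict.empty.insert start 1
  let dp := (PySem.List.pyRange start (end_ + 1) 1).foldl (fun dp n =>
    if dp.getD n 0 = 0 then dp
    else
      let dp := if n + step_add ≤ end_ then
          dp.insert (n + step_add) (dp.getD (n + step_add) 0 + dp.getD n 0) else dp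
      let dp := if step_tens ≠ 0 ∧ n + step_tens ≤ end_ ∧
          PySem.Int.mod (PySem.Int.floordiv n 10) 10 + tens_step ≤ 9 then
          dp.insert (n + step_tens) (dp.getD (n + step_tens) 0 + dp.getD n 0) else dp
      dp) dp
  dp.getD end_ 0

-- ===== PORT B =====
-- helper: Python's  `g, b = ga, gt; while b: g, b = b, g % b`
def pyGcd (g : Int) (b : Int) : Int :=
  if h : b ≠ 0 then pyGcd b (PySem.Int.mod g b) else g
termination_by b.natAbs
decreasing_by
  rcases lt_or_gt_of_ne h with hb | hb
  · have hm := PySem.Int.mod_neg_bounds (a := g) hb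
    omega
  · have h1 := PySem.Int.mod_nonneg (a := g) hb
    have h2 := PySem.Int.mod_lt (a := g) hb
    omega

-- helper: Python's  `while n >= start: ...; n -= g`  (runs exactly (end-start)//g times)
def pvBLoop (end_ : Int) (add_step : Int) (tens_step : Int) (ga : Int) (gt : Int) (g : Int) :
    ℕ → Int → PySem.Dict Int Int → PySem.Dict Int Int
  | 0, _, w => w
  | k+1, n, w =>
      let c := (if ga ≠ 0 ∧ n + add_step ≤ end_ then w.getD (n + add_step) 0 else 0)
             + (if gt ≠ 0 ∧ n + 10 * tens_step ≤ end_ ∧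
                   PySem.Int.mod (PySem.Int.floordiv n 10) 10 + tens_step ≤ 9 then
                 w.getD (n + 10 * tens_step) 0 else 0)
      pvBLoop end_ add_step tens_step ga gt g k (n - g) (w.insert n c)

def solve_task9_calculator_alt (start : Int) (end_ : Int) (add_step : Int) (tens_step : Int) : Int :=
  let t := 10 * tens_step
  let ga := if 0 < add_step then add_step else 0
  let gt := if 0 < t then t else 0
  let g := pyGcd ga gt
  if start = end_ then 1
  else if g = 0 then 0
  else if end_ < start then 0
  else if PySem.Int.mod (end_ - start) g ≠ 0 then 0
  else
    (pvBLoop end_ add_step tens_step ga gt g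
      ((PySem.Int.floordiv (end_ - start) g).toNat) (end_ - g)
      (PySem.Dict.empty.insert end_ 1)).getD start 0

-- ===== PRECONDITION & SPEC =====
-- Pre_ excludes add_step = 0, where the 'add 0' command is a no-op so the number of programs is
-- ill-defined (inserting no-ops yields infinitely many programs) and no finite answer is specified:
-- A returns an accidental power of two from doubling its dp cell in place, B the no-op-free count.
def Pre_solve_task9_calculator (start : Int) (end_ : Int) (add_step : Int) (tens_step : Int) : Prop :=
  add_step ≠ 0
instance (start : Int) (end_ : Int) (add_step : Int) (tens_step : Int) : Decidable (Pre_solve_task9_calculator start end_ add_step tens_step) := by unfold Pre_solve_task9_calculator; infer_instance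

def pvWitness_solve_task9_calculator : Int × Int × Int × Int := (0, 5, 1, 1)

def Spec_solve_task9_calculator (start : Int) (end_ : Int) (add_step : Int) (tens_step : Int) (out : Int) : Prop := out = solve_task9_calculator_alt start end_ add_step tens_step
instance (start : Int) (end_ : Int) (add_step : Int) (tens_step : Int) (out : Int) : Decidable (Spec_solve_task9_calculator start end_ add_step tens_step out) := by unfold Spec_solve_task9_calculator; infer_instance

-- ===== CLAIM =====
def Claim_equal_solve_task9_calculator : Prop := ∀ (start : Int) (end_ : Int) (add_step : Int) (tens_step : Int), Dom_solve_task9_calculator start end_ add_step tens_step → Pre_solve_task9_calculator start end_ add_step tens_step → Spec_solve_task9_calculator start end_ add_step tens_step (solve_task9_calculator start end_ add_step tens_step)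

-- ===== LEMMAS AND PROOFS =====

-- pvW s a t ts 1 n : number of programs from s to n with moves +a (if 0<a) and +t guarded by the
-- tens digit of the source; this is A's dp semantics (coef generalizes A's a=0 doubling).
def pvW (start a t ts coef : Int) (n : Int) : Int :=
  if _h1 : n < start then 0
  else if _h2 : n = start then 1
  else
    (if _h3 : 0 < a then pvW start a t ts coef (n - a) else 0) +
    (if _h4 : 0 < t ∧ PySem.Int.mod (PySem.Int.floordiv (n - t) 10) 10 + ts ≤ 9 then
        coef * pvW start a t ts coef (n - t) else 0)
termination_by (n - start).toNat
decreasing_by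
  · omega
  · omega

theorem pvW_of_lt {start a t ts coef n : Int} (h : n < start) : pvW start a t ts coef n = 0 := by
  rw [pvW]; simp [h]

theorem pvW_self (start a t ts coef : Int) : pvW start a t ts coef start = 1 := by
  rw [pvW]; simp

theorem pvW_of_gt {start a t ts coef n : Int} (h1 : start < n) :
    pvW start a t ts coef n =
      (if 0 < a then pvW start a t ts coef (n - a) else 0) +
      (if 0 < t ∧ PySem.Int.mod (PySem.Int.floordiv (n - t) 10) 10 + ts ≤ 9 then
          coef * pvW start a t ts coef (n - t) else 0) := by
  rw [pvW]
  rw [dif_neg (show ¬ n < start by omega), dif_neg (show ¬ n = start by omega)]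
  rw [dite_eq_ite, dite_eq_ite]

-- ---------- A side (forward push-DP equals pvW) ----------

-- pvInc start a ts coef n m: the contents of A's cell m from pushes of all sources ≤ n.
def pvInc (start a ts coef n m : Int) : Int :=
  (if m = start then 1 else 0)
  + (if 0 < a ∧ start ≤ m - a ∧ m - a ≤ n then pvW start a (10 * ts) ts coef (m - a) else 0)
  + (if 0 < 10 * ts ∧ start ≤ m - 10 * ts ∧ m - 10 * ts ≤ n ∧
        PySem.Int.mod (PySem.Int.floordiv (m - 10 * ts) 10) 10 + ts ≤ 9 then
      coef * pvW start a (10 * ts) ts coef (m - 10 * ts) else 0)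

theorem pvInc_prev_self (start a ts coef n : Int) (h : start ≤ n) :
    pvInc start a ts coef (n - 1) n = pvW start a (10 * ts) ts coef n := by
  unfold pvInc
  by_cases hn : n = start
  · subst hn
    rw [if_pos rfl, pvW_self,
      if_neg (by rintro ⟨h1, h2, -⟩; omega),
      if_neg (by rintro ⟨h1, h2, -, -⟩; omega)]
    ring
  · rw [pvW_of_gt (show start < n by omega), if_neg hn]
    have hadd : (if 0 < a ∧ start ≤ n - a ∧ n - a ≤ n - 1 then
        pvW start a (10 * ts) ts coef (n - a) else 0)
        = (if 0 < a then pvW start a (10 * ts) ts coef (n - a) else 0) := by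
      by_cases ha : 0 < a
      · by_cases hs : start ≤ n - a
        · rw [if_pos ⟨ha, hs, by omega⟩, if_pos ha]
        · rw [if_neg (by rintro ⟨-, h2, -⟩; omega), if_pos ha, pvW_of_lt (by omega)]
      · rw [if_neg (by rintro ⟨h1, -⟩; omega), if_neg ha]
    have htens : (if 0 < 10 * ts ∧ start ≤ n - 10 * ts ∧ n - 10 * ts ≤ n - 1 ∧
          PySem.Int.mod (PySem.Int.floordiv (n - 10 * ts) 10) 10 + ts ≤ 9 then
        coef * pvW start a (10 * ts) ts coef (n - 10 * ts) else 0)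
        = (if 0 < 10 * ts ∧
            PySem.Int.mod (PySem.Int.floordiv (n - 10 * ts) 10) 10 + ts ≤ 9 then
          coef * pvW start a (10 * ts) ts coef (n - 10 * ts) else 0) := by
      by_cases hc : 0 < 10 * ts ∧
          PySem.Int.mod (PySem.Int.floordiv (n - 10 * ts) 10) 10 + ts ≤ 9
      · by_cases hs : start ≤ n - 10 * ts
        · rw [if_pos ⟨hc.1, hs, by omega, hc.2⟩, if_pos hc]
        · rw [if_neg (by rintro ⟨-, h2, -, -⟩; omega), if_pos hc,
            pvW_of_lt (by omega), mul_zero]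
      · rw [if_neg (by rintro ⟨h1, -, -, h4⟩; exact hc ⟨h1, h4⟩), if_neg hc]
    rw [hadd, htens, zero_add]

theorem pvInc_step (start a ts coef n m : Int) (hn : start ≤ n) (_hm : n < m) :
    pvInc start a ts coef n m = pvInc start a ts coef (n - 1) m
      + (if 0 < a ∧ m = n + a then pvW start a (10 * ts) ts coef n else 0)
      + (if 0 < 10 * ts ∧ m = n + 10 * ts ∧
            PySem.Int.mod (PySem.Int.floordiv n 10) 10 + ts ≤ 9 then
          coef * pvW start a (10 * ts) ts coef n else 0) := by
  unfold pvInc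
  have hadd : (if 0 < a ∧ start ≤ m - a ∧ m - a ≤ n then
        pvW start a (10 * ts) ts coef (m - a) else 0)
      = (if 0 < a ∧ start ≤ m - a ∧ m - a ≤ n - 1 then
        pvW start a (10 * ts) ts coef (m - a) else 0)
      + (if 0 < a ∧ m = n + a then pvW start a (10 * ts) ts coef n else 0) := by
    by_cases h : 0 < a ∧ m = n + a
    · obtain ⟨ha, hm'⟩ := h
      rw [if_pos ⟨ha, by omega, by omega⟩, if_neg (by rintro ⟨-, -, h3⟩; omega),
        if_pos ⟨ha, hm'⟩, show m - a = n by omega, zero_add]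
    · rw [if_neg h, add_zero]
      by_cases h1 : 0 < a ∧ start ≤ m - a ∧ m - a ≤ n - 1
      · rw [if_pos h1, if_pos ⟨h1.1, h1.2.1, by omega⟩]
      · by_cases h2 : 0 < a ∧ start ≤ m - a ∧ m - a ≤ n
        · exact absurd ⟨h2.1, by omega⟩ h
        · rw [if_neg h1, if_neg h2]
  have htens : (if 0 < 10 * ts ∧ start ≤ m - 10 * ts ∧ m - 10 * ts ≤ n ∧
          PySem.Int.mod (PySem.Int.floordiv (m - 10 * ts) 10) 10 + ts ≤ 9 then
        coef * pvW start a (10 * ts) ts coef (m - 10 * ts) else 0)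
      = (if 0 < 10 * ts ∧ start ≤ m - 10 * ts ∧ m - 10 * ts ≤ n - 1 ∧
          PySem.Int.mod (PySem.Int.floordiv (m - 10 * ts) 10) 10 + ts ≤ 9 then
        coef * pvW start a (10 * ts) ts coef (m - 10 * ts) else 0)
      + (if 0 < 10 * ts ∧ m = n + 10 * ts ∧
          PySem.Int.mod (PySem.Int.floordiv n 10) 10 + ts ≤ 9 then
        coef * pvW start a (10 * ts) ts coef n else 0) := by
    by_cases h : 0 < 10 * ts ∧ m = n + 10 * ts ∧
        PySem.Int.mod (PySem.Int.floordiv n 10) 10 + ts ≤ 9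
    · obtain ⟨ht, hm', hg⟩ := h
      rw [if_pos ⟨ht, by omega, by omega, by rw [show m - 10 * ts = n by omega]; exact hg⟩,
        if_neg (by rintro ⟨-, -, h3, -⟩; omega),
        if_pos ⟨ht, hm', hg⟩, show m - 10 * ts = n by omega, zero_add]
    · rw [if_neg h, add_zero]
      by_cases h1 : 0 < 10 * ts ∧ start ≤ m - 10 * ts ∧ m - 10 * ts ≤ n - 1 ∧
          PySem.Int.mod (PySem.Int.floordiv (m - 10 * ts) 10) 10 + ts ≤ 9
      · rw [if_pos h1, if_pos ⟨h1.1, h1.2.1, by omega, h1.2.2.2⟩]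
      · by_cases h2 : 0 < 10 * ts ∧ start ≤ m - 10 * ts ∧ m - 10 * ts ≤ n ∧
            PySem.Int.mod (PySem.Int.floordiv (m - 10 * ts) 10) 10 + ts ≤ 9
        · refine absurd ⟨h2.1, by omega, ?_⟩ h
          have : m - 10 * ts = n := by omega
          rw [← this]; exact h2.2.2.2
        · rw [if_neg h1, if_neg h2]
  rw [hadd, htens]; ring

-- One iteration of A's loop, seen from any still-unprocessed cell m.
theorem pvA_step (end_ a ts : Int) (d : PySem.Dict Int Int) (n m : Int)
    (hm : n < m) (hme : m ≤ end_) (hne : n ≤ end_) :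
    (if d.getD n 0 = 0 then d
     else
       let d1 := if n + a ≤ end_ then
           d.insert (n + a) (d.getD (n + a) 0 + d.getD n 0) else d
       let d2 := if 10 * ts ≠ 0 ∧ n + 10 * ts ≤ end_ ∧
           PySem.Int.mod (PySem.Int.floordiv n 10) 10 + ts ≤ 9 then
           d1.insert (n + 10 * ts) (d1.getD (n + 10 * ts) 0 + d1.getD n 0) else d1
       d2).getD m 0
    = d.getD m 0 + (if 0 < a ∧ m = n + a then d.getD n 0 else 0)
      + (if 0 < 10 * ts ∧ m = n + 10 * ts ∧
            PySem.Int.mod (PySem.Int.floordiv n 10) 10 + ts ≤ 9 then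
          (if a = 0 then 2 else 1) * d.getD n 0 else 0) := by
  by_cases he : d.getD n 0 = 0
  · rw [if_pos he, he]
    simp
  · rw [if_neg he]
    simp only []
    set d1 : PySem.Dict Int Int := if n + a ≤ end_ then
        d.insert (n + a) (d.getD (n + a) 0 + d.getD n 0) else d with hd1
    have h1n : d1.getD n 0 = (if a = 0 then 2 else 1) * d.getD n 0 := by
      by_cases ha : a = 0
      · subst ha
        rw [hd1, if_pos (show n + 0 ≤ end_ by omega), PySem.Dict.getD_insert,
          if_pos (by omega), if_pos rfl, show n + 0 = n by ring]
        ring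
      · rw [if_neg ha, one_mul, hd1]
        by_cases hin : n + a ≤ end_
        · rw [if_pos hin, PySem.Dict.getD_insert, if_neg (by omega)]
        · rw [if_neg hin]
    have h1m : d1.getD m 0 = d.getD m 0 + (if 0 < a ∧ m = n + a then d.getD n 0 else 0) := by
      by_cases hcase : 0 < a ∧ m = n + a
      · obtain ⟨ha, hma⟩ := hcase
        rw [hd1, if_pos (show n + a ≤ end_ by omega), PySem.Dict.getD_insert,
          if_pos hma, if_pos ⟨ha, hma⟩, ← hma]
      · rw [if_neg hcase, add_zero, hd1]
        by_cases hin : n + a ≤ end_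
        · rw [if_pos hin, PySem.Dict.getD_insert,
            if_neg (fun hEq => hcase ⟨by omega, hEq⟩)]
        · rw [if_neg hin]
    by_cases ht : 10 * ts ≠ 0 ∧ n + 10 * ts ≤ end_ ∧
        PySem.Int.mod (PySem.Int.floordiv n 10) 10 + ts ≤ 9
    · rw [if_pos ht, PySem.Dict.getD_insert]
      by_cases hmt : m = n + 10 * ts
      · have hcond : 0 < 10 * ts ∧ m = n + 10 * ts ∧
            PySem.Int.mod (PySem.Int.floordiv n 10) 10 + ts ≤ 9 :=
          ⟨by omega, hmt, ht.2.2⟩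
        rw [if_pos hmt, if_pos hcond, ← hmt, h1m, h1n]
      · have hcond : ¬(0 < 10 * ts ∧ m = n + 10 * ts ∧
            PySem.Int.mod (PySem.Int.floordiv n 10) 10 + ts ≤ 9) := by
          rintro ⟨-, h2, -⟩; exact hmt h2
        rw [if_neg hmt, if_neg hcond, add_zero, h1m]
    · have hcond : ¬(0 < 10 * ts ∧ m = n + 10 * ts ∧
          PySem.Int.mod (PySem.Int.floordiv n 10) 10 + ts ≤ 9) := by
        rintro ⟨h1, h2, h3⟩; exact ht ⟨by omega, by omega, h3⟩
      rw [if_neg ht, if_neg hcond, add_zero, h1m]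

theorem pvA_inv (start end_ a ts coef : Int) (hc : coef = if a = 0 then 2 else 1) (N : ℕ)
    (hN : (start : Int) + N ≤ end_ + 1) :
    ∀ m : Int, start + N ≤ m → m ≤ end_ →
      ((PySem.List.pyRange start (start + N) 1).foldl
        (fun dp n =>
          if dp.getD n 0 = 0 then dp
          else
            let dp := if n + a ≤ end_ then
                dp.insert (n + a) (dp.getD (n + a) 0 + dp.getD n 0) else dp
            let dp := if 10 * ts ≠ 0 ∧ n + 10 * ts ≤ end_ ∧
                PySem.Int.mod (PySem.Int.floordiv n 10) 10 + ts ≤ 9 then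
                dp.insert (n + 10 * ts) (dp.getD (n + 10 * ts) 0 + dp.getD n 0) else dp
            dp)
        (PySem.Dict.empty.insert start 1)).getD m 0 = pvInc start a ts coef (start + N - 1) m := by
  revert hN
  induction N with
  | zero =>
    intro hN m hm1 hm2
    simp only [Nat.cast_zero, add_zero] at hm1 ⊢
    rw [PySem.List.pyRange_one_eq_nil (le_refl start)]
    simp only [List.foldl_nil]
    rw [PySem.Dict.getD_insert]
    unfold pvInc
    by_cases hm : m = start
    · rw [if_pos hm, if_pos hm, if_neg (by rintro ⟨h1, h2, h3⟩; omega),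
        if_neg (by rintro ⟨h1, h2, h3, -⟩; omega)]
      ring
    · rw [if_neg hm, PySem.Dict.getD_empty, if_neg hm,
        if_neg (by rintro ⟨h1, h2, h3⟩; omega),
        if_neg (by rintro ⟨h1, h2, h3, -⟩; omega)]
      ring
  | succ N ih =>
    intro hN m hm1 hm2
    have hN' : (start : Int) + N ≤ end_ + 1 := by push_cast at hN ⊢; omega
    have ihm := ih hN'
    have hsplit : PySem.List.pyRange start (start + ((N : ℕ) + 1 : ℕ)) 1
        = PySem.List.pyRange start (start + (N : ℕ)) 1 ++ [start + (N : ℕ)] := by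
      rw [show (start : Int) + ((N : ℕ) + 1 : ℕ) = (start + N + 1) by push_cast; ring]
      exact PySem.List.pyRange_one_succ_right (by omega)
    rw [hsplit, List.foldl_append]
    simp only [List.foldl_cons, List.foldl_nil]
    set n : Int := start + (N : ℕ) with hn
    set d : PySem.Dict Int Int := ((PySem.List.pyRange start n 1).foldl
        (fun dp n =>
          if dp.getD n 0 = 0 then dp
          else
            let dp := if n + a ≤ end_ then
                dp.insert (n + a) (dp.getD (n + a) 0 + dp.getD n 0) else dp
            let dp := if 10 * ts ≠ 0 ∧ n + 10 * ts ≤ end_ ∧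
                PySem.Int.mod (PySem.Int.floordiv n 10) 10 + ts ≤ 9 then
                dp.insert (n + 10 * ts) (dp.getD (n + 10 * ts) 0 + dp.getD n 0) else dp
            dp)
        (PySem.Dict.empty.insert start 1)) with hd
    have hdn : d.getD n 0 = pvW start a (10 * ts) ts coef n := by
      rw [ihm n (le_refl _) (by omega)]
      exact pvInc_prev_self start a ts coef n (by omega)
    rw [show (start : Int) + ((N : ℕ) + 1 : ℕ) - 1 = n by rw [hn]; push_cast; ring]
    rw [pvInc_step start a ts coef n m (by omega) (by omega)]
    have hm' := ihm m (by omega) hm2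
    rw [← hm', ← hdn, hc]
    exact pvA_step end_ a ts d n m (by omega) hm2 (by omega)

-- A's last iteration (n = end_) multiplies the answer cell by 2 exactly when a = 0.
theorem pvA_last (end_ a ts : Int) (d : PySem.Dict Int Int) :
    (if d.getD end_ 0 = 0 then d
     else
       let d1 := if end_ + a ≤ end_ then
           d.insert (end_ + a) (d.getD (end_ + a) 0 + d.getD end_ 0) else d
       let d2 := if 10 * ts ≠ 0 ∧ end_ + 10 * ts ≤ end_ ∧
           PySem.Int.mod (PySem.Int.floordiv end_ 10) 10 + ts ≤ 9 then
           d1.insert (end_ + 10 * ts) (d1.getD (end_ + 10 * ts) 0 + d1.getD end_ 0) else d1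
       d2).getD end_ 0 = (if a = 0 then 2 else 1) * d.getD end_ 0 := by
  by_cases he : d.getD end_ 0 = 0
  · rw [if_pos he, he, mul_zero]
  · rw [if_neg he]
    simp only []
    set d1 : PySem.Dict Int Int := if end_ + a ≤ end_ then
        d.insert (end_ + a) (d.getD (end_ + a) 0 + d.getD end_ 0) else d with hd1
    have h1 : d1.getD end_ 0 = (if a = 0 then 2 else 1) * d.getD end_ 0 := by
      by_cases ha : a = 0
      · subst ha
        rw [hd1, if_pos (by omega), PySem.Dict.getD_insert, if_pos (by omega),
          if_pos rfl, show end_ + 0 = end_ by ring]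
        ring
      · rw [if_neg ha, one_mul, hd1]
        by_cases hin : end_ + a ≤ end_
        · rw [if_pos hin, PySem.Dict.getD_insert, if_neg (by omega)]
        · rw [if_neg hin]
    by_cases ht : 10 * ts ≠ 0 ∧ end_ + 10 * ts ≤ end_ ∧
        PySem.Int.mod (PySem.Int.floordiv end_ 10) 10 + ts ≤ 9
    · rw [if_pos ht, PySem.Dict.getD_insert, if_neg (by omega)]
      exact h1
    · rw [if_neg ht]
      exact h1

theorem pvA_eq (start end_ a ts : Int) :
    solve_task9_calculator start end_ a ts =
      (if a = 0 then 2 else 1) * pvW start a (10 * ts) ts (if a = 0 then 2 else 1) end_ := by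
  by_cases h : start ≤ end_
  · have hcast : ((end_ - start).toNat : ℤ) = end_ - start := Int.toNat_of_nonneg (by omega)
    have hinv := pvA_inv start end_ a ts (if a = 0 then 2 else 1) rfl
      (end_ - start).toNat (by omega)
    rw [hcast] at hinv
    rw [show start + (end_ - start) = end_ by ring] at hinv
    simp only [solve_task9_calculator]
    rw [PySem.List.pyRange_one_succ_right h, List.foldl_append]
    simp only [List.foldl_cons, List.foldl_nil]
    set d : PySem.Dict Int Int := ((PySem.List.pyRange start end_ 1).foldl
        (fun dp n =>
          if dp.getD n 0 = 0 then dp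
          else
            let dp := if n + a ≤ end_ then
                dp.insert (n + a) (dp.getD (n + a) 0 + dp.getD n 0) else dp
            let dp := if 10 * ts ≠ 0 ∧ n + 10 * ts ≤ end_ ∧
                PySem.Int.mod (PySem.Int.floordiv n 10) 10 + ts ≤ 9 then
                dp.insert (n + 10 * ts) (dp.getD (n + 10 * ts) 0 + dp.getD n 0) else dp
            dp)
        (PySem.Dict.empty.insert start 1)) with hd
    have hde : d.getD end_ 0 = pvW start a (10 * ts) ts (if a = 0 then 2 else 1) end_ := by
      rw [hinv end_ (le_refl _) (le_refl _)]
      exact pvInc_prev_self start a ts _ end_ (by omega)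
    rw [← hde]
    exact pvA_last end_ a ts d
  · simp only [solve_task9_calculator]
    rw [PySem.List.pyRange_one_eq_nil (by omega)]
    simp only [List.foldl_nil]
    rw [PySem.Dict.getD_insert, if_neg (by omega), PySem.Dict.getD_empty,
      pvW_of_lt (by omega), mul_zero]

-- ---------- suffix counts (B's semantics) ----------

-- pvS end_ a ts n : the number of programs taking n to end_.
def pvS (end_ a ts : Int) (n : Int) : Int :=
  if _h1 : end_ < n then 0
  else if _h2 : n = end_ then 1
  else
    (if _h3 : 0 < a ∧ n + a ≤ end_ then pvS end_ a ts (n + a) else 0) +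
    (if _h4 : 0 < 10 * ts ∧ n + 10 * ts ≤ end_ ∧
        PySem.Int.mod (PySem.Int.floordiv n 10) 10 + ts ≤ 9 then
      pvS end_ a ts (n + 10 * ts) else 0)
termination_by (end_ - n).toNat
decreasing_by
  · omega
  · omega

theorem pvS_of_gt {end_ a ts n : Int} (h : end_ < n) : pvS end_ a ts n = 0 := by
  rw [pvS]; simp [h]

theorem pvS_self (end_ a ts : Int) : pvS end_ a ts end_ = 1 := by
  rw [pvS]; simp

theorem pvS_of_lt {end_ a ts n : Int} (h : n < end_) :
    pvS end_ a ts n =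
      (if 0 < a ∧ n + a ≤ end_ then pvS end_ a ts (n + a) else 0) +
      (if 0 < 10 * ts ∧ n + 10 * ts ≤ end_ ∧
          PySem.Int.mod (PySem.Int.floordiv n 10) 10 + ts ≤ 9 then
        pvS end_ a ts (n + 10 * ts) else 0) := by
  rw [pvS]
  rw [dif_neg (show ¬ end_ < n by omega), dif_neg (show ¬ n = end_ by omega)]
  rw [dite_eq_ite, dite_eq_ite]

-- First-move decomposition of the forward count pvW (coef = 1).
theorem pvW_fm (a t ts : Int) : ∀ (s n : Int),
    pvW s a t ts 1 n =
      (if 0 < a then pvW (s + a) a t ts 1 n else 0) +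
      (if 0 < t ∧ PySem.Int.mod (PySem.Int.floordiv s 10) 10 + ts ≤ 9 then
          pvW (s + t) a t ts 1 n else 0) +
      (if n = s then 1 else 0) := by
  have key : ∀ (c : ℕ) (s n : Int), (n - s).toNat = c →
      pvW s a t ts 1 n =
        (if 0 < a then pvW (s + a) a t ts 1 n else 0) +
        (if 0 < t ∧ PySem.Int.mod (PySem.Int.floordiv s 10) 10 + ts ≤ 9 then
            pvW (s + t) a t ts 1 n else 0) +
        (if n = s then 1 else 0) := by
    intro c
    induction c using Nat.strong_induction_on with
    | _ c IH =>
      intro s n hc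
      by_cases hlt : n < s
      · rw [pvW_of_lt hlt]
        have e1 : (if 0 < a then pvW (s + a) a t ts 1 n else 0) = 0 := by
          split_ifs with h
          · exact pvW_of_lt (by omega)
          · rfl
        have e2 : (if 0 < t ∧ PySem.Int.mod (PySem.Int.floordiv s 10) 10 + ts ≤ 9 then
            pvW (s + t) a t ts 1 n else 0) = 0 := by
          split_ifs with h
          · exact pvW_of_lt (by omega)
          · rfl
        rw [e1, e2, if_neg (by omega)]
        ring
      by_cases heq : n = s
      · subst heq
        rw [pvW_self]
        have e1 : (if 0 < a then pvW (n + a) a t ts 1 n else 0) = 0 := by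
          split_ifs with h
          · exact pvW_of_lt (by omega)
          · rfl
        have e2 : (if 0 < t ∧ PySem.Int.mod (PySem.Int.floordiv n 10) 10 + ts ≤ 9 then
            pvW (n + t) a t ts 1 n else 0) = 0 := by
          split_ifs with h
          · exact pvW_of_lt (by omega)
          · rfl
        rw [e1, e2, if_pos rfl]
        ring
      · have hgt : s < n := by omega
        have ih' : ∀ m : Int, m < n →
            pvW s a t ts 1 m =
              (if 0 < a then pvW (s + a) a t ts 1 m else 0) +
              (if 0 < t ∧ PySem.Int.mod (PySem.Int.floordiv s 10) 10 + ts ≤ 9 then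
                  pvW (s + t) a t ts 1 m else 0) +
              (if m = s then 1 else 0) := by
          intro m hm
          exact IH (m - s).toNat (by omega) s m rfl
        rw [pvW_of_gt hgt]
        have e1 : (if 0 < a then pvW s a t ts 1 (n - a) else 0)
            = (if 0 < a then
                ((if 0 < a then pvW (s + a) a t ts 1 (n - a) else 0) +
                 (if 0 < t ∧ PySem.Int.mod (PySem.Int.floordiv s 10) 10 + ts ≤ 9 then
                    pvW (s + t) a t ts 1 (n - a) else 0) +
                 (if n - a = s then 1 else 0)) else 0) := by
          by_cases h : 0 < a
          · rw [if_pos h, if_pos h, ih' (n - a) (by omega)]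
          · rw [if_neg h, if_neg h]
        have e2 : (if 0 < t ∧ PySem.Int.mod (PySem.Int.floordiv (n - t) 10) 10 + ts ≤ 9 then
              (1 : Int) * pvW s a t ts 1 (n - t) else 0)
            = (if 0 < t ∧ PySem.Int.mod (PySem.Int.floordiv (n - t) 10) 10 + ts ≤ 9 then
                ((if 0 < a then pvW (s + a) a t ts 1 (n - t) else 0) +
                 (if 0 < t ∧ PySem.Int.mod (PySem.Int.floordiv s 10) 10 + ts ≤ 9 then
                    pvW (s + t) a t ts 1 (n - t) else 0) +
                 (if n - t = s then 1 else 0)) else 0) := by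
          by_cases h : 0 < t ∧ PySem.Int.mod (PySem.Int.floordiv (n - t) 10) 10 + ts ≤ 9
          · rw [if_pos h, if_pos h, one_mul, ih' (n - t) (by omega)]
          · rw [if_neg h, if_neg h]
        rw [e1, e2]
        -- Right-hand side: expand the two outer pvW's by their last move.
        have hA : (if 0 < a then pvW (s + a) a t ts 1 n else 0)
            = (if 0 < a then
                  ((if 0 < a then pvW (s + a) a t ts 1 (n - a) else 0) +
                   (if 0 < t ∧ PySem.Int.mod (PySem.Int.floordiv (n - t) 10) 10 + ts ≤ 9 then
                      (1 : Int) * pvW (s + a) a t ts 1 (n - t) else 0)) +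
                  (if n - a = s then 1 else 0) else 0) := by
          by_cases h : 0 < a
          case neg => rw [if_neg h, if_neg h]
          rw [if_pos h, if_pos h]
          rcases lt_trichotomy n (s + a) with h1 | h1 | h1
          · rw [pvW_of_lt h1]
            have z1 : (if 0 < a then pvW (s + a) a t ts 1 (n - a) else 0) = 0 := by
              rw [if_pos h, pvW_of_lt (by omega)]
            have z2 : (if 0 < t ∧ PySem.Int.mod (PySem.Int.floordiv (n - t) 10) 10 + ts ≤ 9 then
                (1 : Int) * pvW (s + a) a t ts 1 (n - t) else 0) = 0 := by
              split_ifs with h2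
              · rw [pvW_of_lt (by omega), mul_zero]
              · rfl
            rw [z1, z2, if_neg (by omega)]
            ring
          · have hw1 : pvW (s + a) a t ts 1 n = 1 := by rw [h1]; exact pvW_self _ _ _ _ _
            have z1 : (if 0 < a then pvW (s + a) a t ts 1 (n - a) else 0) = 0 := by
              rw [if_pos h, pvW_of_lt (by omega)]
            have z2 : (if 0 < t ∧ PySem.Int.mod (PySem.Int.floordiv (n - t) 10) 10 + ts ≤ 9 then
                (1 : Int) * pvW (s + a) a t ts 1 (n - t) else 0) = 0 := by
              split_ifs with h2
              · rw [pvW_of_lt (by omega), mul_zero]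
              · rfl
            rw [hw1, z1, z2, if_pos (by omega)]
            ring
          · rw [pvW_of_gt h1, if_neg (show ¬ n - a = s by omega)]
            ring
        have hT : (if 0 < t ∧ PySem.Int.mod (PySem.Int.floordiv s 10) 10 + ts ≤ 9 then
              pvW (s + t) a t ts 1 n else 0)
            = (if 0 < t ∧ PySem.Int.mod (PySem.Int.floordiv s 10) 10 + ts ≤ 9 then
                  ((if 0 < a then pvW (s + t) a t ts 1 (n - a) else 0) +
                   (if 0 < t ∧ PySem.Int.mod (PySem.Int.floordiv (n - t) 10) 10 + ts ≤ 9 then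
                      (1 : Int) * pvW (s + t) a t ts 1 (n - t) else 0)) +
                  (if n - t = s then 1 else 0) else 0) := by
          by_cases h : 0 < t ∧ PySem.Int.mod (PySem.Int.floordiv s 10) 10 + ts ≤ 9
          case neg => rw [if_neg h, if_neg h]
          rw [if_pos h, if_pos h]
          rcases lt_trichotomy n (s + t) with h1 | h1 | h1
          · rw [pvW_of_lt h1]
            have z1 : (if 0 < a then pvW (s + t) a t ts 1 (n - a) else 0) = 0 := by
              split_ifs with h2
              · exact pvW_of_lt (by omega)
              · rfl
            have z2 : (if 0 < t ∧ PySem.Int.mod (PySem.Int.floordiv (n - t) 10) 10 + ts ≤ 9 then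
                (1 : Int) * pvW (s + t) a t ts 1 (n - t) else 0) = 0 := by
              split_ifs with h2
              · rw [pvW_of_lt (by omega), mul_zero]
              · rfl
            rw [z1, z2, if_neg (by omega)]
            ring
          · have hw1 : pvW (s + t) a t ts 1 n = 1 := by rw [h1]; exact pvW_self _ _ _ _ _
            have z1 : (if 0 < a then pvW (s + t) a t ts 1 (n - a) else 0) = 0 := by
              split_ifs with h2
              · exact pvW_of_lt (by omega)
              · rfl
            have z2 : (if 0 < t ∧ PySem.Int.mod (PySem.Int.floordiv (n - t) 10) 10 + ts ≤ 9 then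
                (1 : Int) * pvW (s + t) a t ts 1 (n - t) else 0) = 0 := by
              split_ifs with h2
              · rw [pvW_of_lt (by omega), mul_zero]
              · rfl
            rw [hw1, z1, z2, if_pos (by omega)]
            ring
          · rw [pvW_of_gt h1, if_neg (show ¬ n - t = s by omega)]
            ring
        rw [hA, hT, if_neg (show ¬ n = s from heq)]
        -- Now both sides are sums of guarded terms; case on all guards and compare.
        by_cases ha : 0 < a <;>
          by_cases hq : 0 < t ∧ PySem.Int.mod (PySem.Int.floordiv s 10) 10 + ts ≤ 9 <;>
          by_cases hτ : 0 < t ∧ PySem.Int.mod (PySem.Int.floordiv (n - t) 10) 10 + ts ≤ 9 <;>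
          by_cases hs1 : n - a = s <;>
          by_cases hs2 : n - t = s
        all_goals
          try (exfalso
               rcases hq with ⟨hx, hy⟩
               rw [← hs2] at hy
               exact hτ ⟨hx, hy⟩)
        all_goals
          try (exfalso
               rcases hτ with ⟨hx, hy⟩
               rw [hs2] at hy
               exact hq ⟨hx, hy⟩)
        all_goals
          simp only [ha, hq, hτ, hs1, hs2, and_self, and_true, true_and, and_false,
            false_and, if_true, if_false, ite_true, ite_false, eq_self_iff_true,
            one_mul, mul_zero, zero_add, add_zero]
        all_goals try ring
        all_goals (split_ifs <;> ring)
  intro s n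
  exact key (n - s).toNat s n rfl

-- The suffix count from s equals the forward count at end_.
theorem pvS_eq_pvW (end_ a ts : Int) : ∀ (s : Int),
    pvS end_ a ts s = pvW s a (10 * ts) ts 1 end_ := by
  have key : ∀ (c : ℕ) (s : Int), (end_ - s).toNat = c →
      pvS end_ a ts s = pvW s a (10 * ts) ts 1 end_ := by
    intro c
    induction c using Nat.strong_induction_on with
    | _ c IH =>
      intro s hc
      by_cases hgt : end_ < s
      · rw [pvS_of_gt hgt, pvW_of_lt hgt]
      by_cases heq : s = end_
      · subst heq
        rw [pvS_self, pvW_self]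
      · have hlt : s < end_ := by omega
        rw [pvS_of_lt hlt, pvW_fm a (10 * ts) ts s end_, if_neg (show ¬ end_ = s by omega)]
        have e1 : (if 0 < a ∧ s + a ≤ end_ then pvS end_ a ts (s + a) else 0)
            = (if 0 < a then pvW (s + a) a (10 * ts) ts 1 end_ else 0) := by
          by_cases h1 : 0 < a
          · by_cases h2 : s + a ≤ end_
            · rw [if_pos ⟨h1, h2⟩, if_pos h1, IH (end_ - (s + a)).toNat (by omega) (s + a) rfl]
            · rw [if_neg (by rintro ⟨-, h⟩; omega), if_pos h1, pvW_of_lt (by omega)]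
          · rw [if_neg (by rintro ⟨h, -⟩; omega), if_neg h1]
        have e2 : (if 0 < 10 * ts ∧ s + 10 * ts ≤ end_ ∧
              PySem.Int.mod (PySem.Int.floordiv s 10) 10 + ts ≤ 9 then
              pvS end_ a ts (s + 10 * ts) else 0)
            = (if 0 < 10 * ts ∧ PySem.Int.mod (PySem.Int.floordiv s 10) 10 + ts ≤ 9 then
                pvW (s + 10 * ts) a (10 * ts) ts 1 end_ else 0) := by
          by_cases h1 : 0 < 10 * ts ∧ PySem.Int.mod (PySem.Int.floordiv s 10) 10 + ts ≤ 9
          · by_cases h2 : s + 10 * ts ≤ end_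
            · rw [if_pos ⟨h1.1, h2, h1.2⟩, if_pos h1,
                IH (end_ - (s + 10 * ts)).toNat (by omega) (s + 10 * ts) rfl]
            · rw [if_neg (by rintro ⟨-, h, -⟩; omega), if_pos h1, pvW_of_lt (by omega)]
          · rw [if_neg (by rintro ⟨x, y, z⟩; exact h1 ⟨x, z⟩), if_neg h1]
        rw [e1, e2]
        ring
  intro s
  exact key (end_ - s).toNat s rfl

-- ---------- gcd helper facts ----------

theorem pyGcd_dvd : ∀ (g b : Int), pyGcd g b ∣ g ∧ pyGcd g b ∣ b := by
  have key : ∀ (c : ℕ) (g b : Int), b.natAbs = c → pyGcd g b ∣ g ∧ pyGcd g b ∣ b := by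
    intro c
    induction c using Nat.strong_induction_on with
    | _ c IH =>
      intro g b hc
      rw [pyGcd]
      by_cases hb : b ≠ 0
      · rw [dif_pos hb]
        have hlt : (PySem.Int.mod g b).natAbs < c := by
          rcases lt_or_gt_of_ne hb with hbn | hbp
          · have hm := PySem.Int.mod_neg_bounds (a := g) hbn
            omega
          · have h1 := PySem.Int.mod_nonneg (a := g) hbp
            have h2 := PySem.Int.mod_lt (a := g) hbp
            omega
        obtain ⟨d1, d2⟩ := IH (PySem.Int.mod g b).natAbs hlt b (PySem.Int.mod g b) rfl
        refine ⟨?_, d1⟩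
        have hfm := PySem.Int.floordiv_mul_add_mod g b
        calc pyGcd b (PySem.Int.mod g b) ∣ PySem.Int.floordiv g b * b + PySem.Int.mod g b :=
              dvd_add (d1.mul_left _) d2
          _ = g := hfm
      · rw [dif_neg hb]
        push_neg at hb
        exact ⟨dvd_refl g, hb ▸ dvd_zero g⟩
  intro g b
  exact key b.natAbs g b rfl

theorem pyGcd_nonneg : ∀ (g b : Int), 0 ≤ g → 0 ≤ b → 0 ≤ pyGcd g b := by
  have key : ∀ (c : ℕ) (g b : Int), b.natAbs = c → 0 ≤ g → 0 ≤ b → 0 ≤ pyGcd g b := by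
    intro c
    induction c using Nat.strong_induction_on with
    | _ c IH =>
      intro g b hc hg hb
      rw [pyGcd]
      by_cases hbz : b ≠ 0
      · rw [dif_pos hbz]
        have hbp : 0 < b := by omega
        have h1 := PySem.Int.mod_nonneg (a := g) hbp
        have h2 := PySem.Int.mod_lt (a := g) hbp
        exact IH (PySem.Int.mod g b).natAbs (by omega) b (PySem.Int.mod g b) rfl hb h1
      · rw [dif_neg hbz]
        exact hg
  intro g b
  exact key b.natAbs g b rfl

-- Any value with a nonzero forward count is congruent to start modulo any common divisor g.
theorem pvW_dvd (a t ts g : Int) (hda : 0 < a → g ∣ a) (hdt : 0 < t → g ∣ t) :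
    ∀ (s n : Int), pvW s a t ts 1 n ≠ 0 → g ∣ (n - s) := by
  have key : ∀ (c : ℕ) (s n : Int), (n - s).toNat = c → pvW s a t ts 1 n ≠ 0 → g ∣ (n - s) := by
    intro c
    induction c using Nat.strong_induction_on with
    | _ c IH =>
      intro s n hc hW
      by_cases hlt : n < s
      · rw [pvW_of_lt hlt] at hW; exact absurd rfl hW
      by_cases heq : n = s
      · subst heq; simp
      · have hgt : s < n := by omega
        rw [pvW_of_gt hgt] at hW
        by_cases h1 : (if 0 < a then pvW s a t ts 1 (n - a) else 0) ≠ 0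
        · have ha : 0 < a := by
            by_contra h; rw [if_neg h] at h1; exact h1 rfl
          rw [if_pos ha] at h1
          have hd := IH (n - a - s).toNat (by omega) s (n - a) rfl h1
          have : n - s = (n - a - s) + a := by ring
          rw [this]
          exact dvd_add hd (hda ha)
        · push_neg at h1
          have h2 : (if 0 < t ∧ PySem.Int.mod (PySem.Int.floordiv (n - t) 10) 10 + ts ≤ 9 then
              (1 : Int) * pvW s a t ts 1 (n - t) else 0) ≠ 0 := by
            intro h; rw [h1, h, add_zero] at hW; exact hW rfl
          have ht : 0 < t ∧ PySem.Int.mod (PySem.Int.floordiv (n - t) 10) 10 + ts ≤ 9 := by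
            by_contra h; rw [if_neg h] at h2; exact h2 rfl
          rw [if_pos ht, one_mul] at h2
          have hd := IH (n - t - s).toNat (by omega) s (n - t) rfl h2
          have : n - s = (n - t - s) + t := by ring
          rw [this]
          exact dvd_add hd (hdt ht.1)
  intro s n
  exact key (n - s).toNat s n rfl

-- ---------- B's strided backward loop ----------

theorem pvBLoop_inv (end_ a ts g : Int) (hg : 0 < g)
    (hda : 0 < a → g ∣ a) (hdt : 0 < 10 * ts → g ∣ (10 * ts)) :
    ∀ (j : ℕ) (i : ℕ) (w : PySem.Dict Int Int),
      (∀ m : Int, w.getD m 0 =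
        if end_ - g * i ≤ m ∧ m ≤ end_ ∧ g ∣ (end_ - m) then pvS end_ a ts m else 0) →
      ∀ m : Int,
        (pvBLoop end_ a ts (if 0 < a then a else 0) (if 0 < 10 * ts then 10 * ts else 0) g
            j (end_ - g * ((i : Int) + 1)) w).getD m 0
        = if end_ - g * ((i : Int) + (j : Int)) ≤ m ∧ m ≤ end_ ∧ g ∣ (end_ - m) then
            pvS end_ a ts m else 0 := by
  intro j
  induction j with
  | zero =>
    intro i w hw m
    simp only [pvBLoop]
    rw [hw m]
    norm_num
  | succ j ih =>
    intro i w hw m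
    simp only [pvBLoop]
    set n : Int := end_ - g * ((i : Int) + 1) with hn
    have hga : ((if 0 < a then a else 0) ≠ 0) ↔ 0 < a := by
      by_cases h : 0 < a
      · simp [h]; omega
      · simp [h]
    have hgt : ((if 0 < 10 * ts then 10 * ts else 0) ≠ 0) ↔ 0 < 10 * ts := by
      by_cases h : 0 < 10 * ts
      · simp [h]; omega
      · simp [h]
    have hipos : (0 : Int) ≤ (i : Int) := Int.natCast_nonneg i
    have hgi : g * ((i : Int) + 1) = g * (i : Int) + g := by ring
    have hginn : 0 ≤ g * (i : Int) := mul_nonneg (le_of_lt hg) hipos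
    have hnlt : n < end_ := by rw [hn]; linarith [hgi, hginn]
    -- the computed cell value is pvS n
    have hc : (if (if 0 < a then a else 0) ≠ 0 ∧ n + a ≤ end_ then w.getD (n + a) 0 else 0)
            + (if (if 0 < 10 * ts then 10 * ts else 0) ≠ 0 ∧ n + 10 * ts ≤ end_ ∧
                  PySem.Int.mod (PySem.Int.floordiv n 10) 10 + ts ≤ 9 then
                w.getD (n + 10 * ts) 0 else 0)
        = pvS end_ a ts n := by
      rw [pvS_of_lt hnlt]
      have eA : (if (if 0 < a then a else 0) ≠ 0 ∧ n + a ≤ end_ then w.getD (n + a) 0 else 0)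
          = (if 0 < a ∧ n + a ≤ end_ then pvS end_ a ts (n + a) else 0) := by
        by_cases h1 : 0 < a ∧ n + a ≤ end_
        · have hge : g ≤ a := Int.le_of_dvd h1.1 (hda h1.1)
          have hcnd : end_ - g * (i : Int) ≤ n + a ∧ n + a ≤ end_ ∧ g ∣ (end_ - (n + a)) := by
            refine ⟨by rw [hn]; linarith [hgi], h1.2, ?_⟩
            have he : end_ - (n + a) = g * ((i : Int) + 1) - a := by rw [hn]; ring
            rw [he]
            exact dvd_sub (Dvd.intro _ rfl) (hda h1.1)
          rw [if_pos ⟨hga.mpr h1.1, h1.2⟩, hw (n + a), if_pos hcnd, if_pos h1]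
        · rw [if_neg (fun hx => h1 ⟨hga.mp hx.1, hx.2⟩), if_neg h1]
      have eT : (if (if 0 < 10 * ts then 10 * ts else 0) ≠ 0 ∧ n + 10 * ts ≤ end_ ∧
              PySem.Int.mod (PySem.Int.floordiv n 10) 10 + ts ≤ 9 then
            w.getD (n + 10 * ts) 0 else 0)
          = (if 0 < 10 * ts ∧ n + 10 * ts ≤ end_ ∧
              PySem.Int.mod (PySem.Int.floordiv n 10) 10 + ts ≤ 9 then
            pvS end_ a ts (n + 10 * ts) else 0) := by
        by_cases h1 : 0 < 10 * ts ∧ n + 10 * ts ≤ end_ ∧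
            PySem.Int.mod (PySem.Int.floordiv n 10) 10 + ts ≤ 9
        · have hge : g ≤ 10 * ts := Int.le_of_dvd h1.1 (hdt h1.1)
          have hcnd : end_ - g * (i : Int) ≤ n + 10 * ts ∧ n + 10 * ts ≤ end_ ∧
              g ∣ (end_ - (n + 10 * ts)) := by
            refine ⟨by rw [hn]; linarith [hgi], h1.2.1, ?_⟩
            have he : end_ - (n + 10 * ts) = g * ((i : Int) + 1) - 10 * ts := by rw [hn]; ring
            rw [he]
            exact dvd_sub (Dvd.intro _ rfl) (hdt h1.1)
          rw [if_pos ⟨hgt.mpr h1.1, h1.2⟩, hw (n + 10 * ts), if_pos hcnd, if_pos h1]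
        · rw [if_neg (fun hx => h1 ⟨hgt.mp hx.1, hx.2⟩), if_neg h1]
      rw [eA, eT]
    -- the inserted dict satisfies the invariant at i+1
    have hw' : ∀ m : Int, (w.insert n
          ((if (if 0 < a then a else 0) ≠ 0 ∧ n + a ≤ end_ then w.getD (n + a) 0 else 0)
          + (if (if 0 < 10 * ts then 10 * ts else 0) ≠ 0 ∧ n + 10 * ts ≤ end_ ∧
                PySem.Int.mod (PySem.Int.floordiv n 10) 10 + ts ≤ 9 then
              w.getD (n + 10 * ts) 0 else 0))).getD m 0
        = if end_ - g * ((i : Int) + 1) ≤ m ∧ m ≤ end_ ∧ g ∣ (end_ - m) then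
            pvS end_ a ts m else 0 := by
      intro m
      rw [PySem.Dict.getD_insert]
      by_cases hm : m = n
      · subst hm
        have hdv : g ∣ (end_ - n) := by
          have he : end_ - n = g * ((i : Int) + 1) := by rw [hn]; ring
          rw [he]
          exact Dvd.intro _ rfl
        rw [if_pos rfl, hc, if_pos ⟨ge_of_eq hn, le_of_lt hnlt, hdv⟩]
      · rw [if_neg hm, hw m]
        by_cases h1 : end_ - g * (i : Int) ≤ m ∧ m ≤ end_ ∧ g ∣ (end_ - m)
        · rw [if_pos h1, if_pos ⟨by linarith [hgi, h1.1], h1.2.1, h1.2.2⟩]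
        · have hno : ¬ (end_ - g * ((i : Int) + 1) ≤ m ∧ m ≤ end_ ∧ g ∣ (end_ - m)) := by
            rintro ⟨h2, h3, h4⟩
            apply h1
            refine ⟨?_, h3, h4⟩
            -- if m were strictly below end_ - g*i, divisibility would force m = n
            by_contra h5
            push_neg at h5
            obtain ⟨k, hk⟩ := h4
            have hklt : (i : Int) < k :=
              lt_of_mul_lt_mul_left (show g * (i : Int) < g * k by linarith [hk]) (le_of_lt hg)
            have hkle : k ≤ (i : Int) + 1 :=
              le_of_mul_le_mul_left (show g * k ≤ g * ((i : Int) + 1) by linarith [hk]) hg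
            have hkk : k = (i : Int) + 1 := by omega
            apply hm
            rw [hkk] at hk
            rw [hn]
            linarith [hk]
          rw [if_neg h1, if_neg hno]
    have hstep := ih (i + 1) _ hw' m
    have harg1 : end_ - g * (((i + 1 : ℕ) : Int) + 1) = n - g := by
      rw [hn]; push_cast; ring
    have harg2 : ((i + 1 : ℕ) : Int) + (j : Int) = (i : Int) + ((j : ℕ) + 1 : ℕ) := by
      push_cast; ring
    rw [harg1, harg2] at hstep
    exact hstep

theorem pvB_eq (start end_ a ts : Int) :
    solve_task9_calculator_alt start end_ a ts = pvW start a (10 * ts) ts 1 end_ := by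
  have hdg := pyGcd_dvd (if 0 < a then a else 0) (if 0 < 10 * ts then 10 * ts else 0)
  have hgnn : 0 ≤ pyGcd (if 0 < a then a else 0) (if 0 < 10 * ts then 10 * ts else 0) := by
    apply pyGcd_nonneg
    · by_cases h : 0 < a <;> simp [h] <;> omega
    · by_cases h : 0 < 10 * ts <;> simp [h] <;> omega
  set g : Int := pyGcd (if 0 < a then a else 0) (if 0 < 10 * ts then 10 * ts else 0) with hgdef
  have hda : 0 < a → g ∣ a := by
    intro h
    have := hdg.1
    rwa [if_pos h] at this
  have hdt : 0 < 10 * ts → g ∣ (10 * ts) := by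
    intro h
    have := hdg.2
    rwa [if_pos h] at this
  simp only [solve_task9_calculator_alt]
  rw [← hgdef]
  by_cases hse : start = end_
  · rw [if_pos hse, hse, pvW_self]
  rw [if_neg hse]
  by_cases hg0 : g = 0
  · rw [if_pos hg0]
    have hna : ¬ 0 < a := by
      intro h
      have := hda h
      rw [hg0] at this
      have := zero_dvd_iff.mp this
      omega
    have hnt : ¬ 0 < 10 * ts := by
      intro h
      have := hdt h
      rw [hg0] at this
      have := zero_dvd_iff.mp this
      omega
    by_cases hlt : end_ < start
    · rw [pvW_of_lt hlt]
    · rw [pvW_of_gt (by omega), if_neg hna, if_neg (by rintro ⟨h, -⟩; exact hnt h)]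
      ring
  rw [if_neg hg0]
  have hgpos : 0 < g := by omega
  by_cases hes : end_ < start
  · rw [if_pos hes, pvW_of_lt hes]
  rw [if_neg hes]
  by_cases hmod : PySem.Int.mod (end_ - start) g ≠ 0
  · rw [if_pos hmod]
    by_contra hW
    have hW' : pvW start a (10 * ts) ts 1 end_ ≠ 0 := fun h => hW h.symm
    have := pvW_dvd a (10 * ts) ts g hda hdt start end_ hW'
    exact hmod ((PySem.Int.mod_eq_zero_iff_dvd _ _).mpr this)
  · rw [if_neg hmod]
    push_neg at hmod
    have hdvd : g ∣ (end_ - start) := (PySem.Int.mod_eq_zero_iff_dvd _ _).mp hmod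
    obtain ⟨k, hk⟩ := hdvd
    have hknn : 0 ≤ k := by nlinarith [sub_nonneg.mpr (show start ≤ end_ by omega)]
    have hfd : PySem.Int.floordiv (end_ - start) g = k := by
      rw [PySem.Int.floordiv_eq_ediv_of_pos hgpos, hk, Int.mul_ediv_cancel_left _ (by omega)]
    have hinit : ∀ m : Int, (PySem.Dict.empty.insert end_ (1 : Int)).getD m 0 =
        if end_ - g * (0 : Int) ≤ m ∧ m ≤ end_ ∧ g ∣ (end_ - m) then pvS end_ a ts m else 0 := by
      intro m
      rw [PySem.Dict.getD_insert]
      by_cases hm : m = end_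
      · subst hm
        rw [if_pos rfl, if_pos ⟨by omega, le_refl _, by simp⟩, pvS_self]
      · rw [if_neg hm, PySem.Dict.getD_empty, if_neg (by rintro ⟨h1, h2, -⟩; omega)]
    have hinv := pvBLoop_inv end_ a ts g hgpos hda hdt k.toNat 0 _
      (by simpa using hinit) start
    rw [hfd]
    have hcast : ((k.toNat : ℕ) : Int) = k := Int.toNat_of_nonneg hknn
    rw [show ((0 : ℕ) : Int) + ((k.toNat : ℕ) : Int) = k by rw [hcast]; ring] at hinv
    rw [show end_ - g * (((0 : ℕ) : Int) + 1) = end_ - g by push_cast; ring] at hinv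
    rw [hinv, if_pos ⟨by linarith [hk], by omega, ⟨k, hk⟩⟩, pvS_eq_pvW]

-- ===== VERDICT =====
theorem solve_task9_calculator_spec : Claim_equal_solve_task9_calculator := by
  intro start end_ a ts _hdom hpre
  show solve_task9_calculator start end_ a ts = solve_task9_calculator_alt start end_ a ts
  rw [pvA_eq, pvB_eq]
  have hne : ¬ a = 0 := hpre
  rw [if_neg hne, one_mul]
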